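-- pv_equiv track=rewrite | github.com/eyasu-k/playList_nitzanim_exercise | playlist.py | generate_progress_bar
-- ===== SOURCE A (Python) =====
-- def generate_progress_bar(iterations: int, bar_size: int, char: str = '\u2588', empty_char: str = '')-> list[str]:
--     if iterations == bar_size:
--         return [char]*iterations
--     if iterations < bar_size and iterations != 0:
--         frequency = bar_size // iterations #the minimum number of chars per progress
--         remaining_chars = bar_size % iterations
--         progress_bar = []
--         for i in range(iterations):
--             if remaining_chars > 0:
--                 progress_bar.append(char*(frequency+1))#extra chars will be added to the first few bars if the bar_size cant be divided by the number of iterations evenly -> if bar_size = 10, iterations = 5 --> progress bar = ['[char][char]', '[char][char]', '[char][char]', '[char][char]', '[char][char]'], if bar_size = 5, iterations = 3 --> progress_bar = ['[char][char]', '[char][char]', '[char]']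
--                 remaining_chars -= 1
--             else:
--                 progress_bar.append(char*frequency)
--         return progress_bar
--
--     empty_space = iterations // bar_size
--     progress_bar = []
--     remaining_chars = bar_size
--     for i in range(iterations):
--         if i%empty_space == 0 and remaining_chars > 0:#the first value inside progress_bar will be char because 0 can be divided by any number, meaning: reversing progress_bar would make the last value of the progress bar be char instead of empty string
--             progress_bar.append(char)
--             remaining_chars -= 1
--         else:
--             progress_bar.append(empty_char)
--     return progress_bar[::-1]#im reversing it because the first value inside progress_bar is always 'char' and i wanted the last value to be always 'char' instead
-- ===== SOURCE B (Python) =====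
-- def generate_progress_bar(iterations: int, bar_size: int, char: str = '\u2588', empty_char: str = '') -> list[str]:
--     if iterations == 0:
--         return []
--     if iterations <= bar_size:
--         # dense bar: distribute bar_size chars evenly over iterations buckets
--         # (covers iterations == bar_size with q == 1, r == 0)
--         q, r = divmod(bar_size, iterations)
--         return [char * (q + 1)] * r + [char * q] * (iterations - r)
--     # sparse bar: preallocate an all-empty bar, then scatter-write the bar_size
--     # marker chars directly at their final (reversed) positions
--     step = iterations // bar_size  # ZeroDivisionError when bar_size == 0, as in A
--     bar = [empty_char] * iterations
--     for k in range(bar_size):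
--         bar[iterations - 1 - k * step] = char
--     return bar
-- ===== Notes on version B (the rewrite author's own statement) =====
-- stated objective: alternative
-- what changed: Dense branch becomes closed-form list repetition from divmod (no loop, merging the iterations==bar_size case); the sparse branch preallocates an all-empty bar and scatter-writes the bar_size marker chars directly at their final reversed positions, looping over the markers instead of scanning all iterations slots with a modulo test, a decrementing counter and a final reversal.
import Mathlib
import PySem

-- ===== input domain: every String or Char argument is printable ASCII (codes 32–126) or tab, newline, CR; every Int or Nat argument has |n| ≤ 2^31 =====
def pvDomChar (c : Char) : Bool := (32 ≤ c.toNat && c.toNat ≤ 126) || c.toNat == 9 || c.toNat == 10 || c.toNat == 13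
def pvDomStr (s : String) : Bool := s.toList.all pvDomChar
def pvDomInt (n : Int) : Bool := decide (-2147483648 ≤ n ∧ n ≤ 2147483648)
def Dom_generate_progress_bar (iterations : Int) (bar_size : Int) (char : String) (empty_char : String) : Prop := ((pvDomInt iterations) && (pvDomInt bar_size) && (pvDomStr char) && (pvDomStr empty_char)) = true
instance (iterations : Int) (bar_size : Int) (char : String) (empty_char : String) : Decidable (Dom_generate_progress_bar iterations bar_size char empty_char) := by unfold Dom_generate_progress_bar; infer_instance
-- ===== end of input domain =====

-- B replaces A's two counter-driven appending loops: the dense branch becomes closed-form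
-- list repetition from divmod, and the sparse branch preallocates an all-empty bar and
-- scatter-writes the bar_size markers at their final reversed positions (objective: alternative).

-- ===== PORT A =====
-- Python's  s * n  on strings (repeat, empty for n ≤ 0); exact via PySem.List.pyRepeat on code points
def pvStrMul (s : String) (n : Int) : String := String.ofList (PySem.List.pyRepeat s.toList n)

def generate_progress_bar (iterations : Int) (bar_size : Int) (char : String) (empty_char : String) : List String :=
  if iterations = bar_size then
    PySem.List.pyRepeat [char] iterations
  else if iterations < bar_size ∧ iterations ≠ 0 then
    let frequency := PySem.Int.floordiv bar_size iterations
    let res := (PySem.List.pyRange 0 iterations 1).foldl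
      (fun (st : List String × Int) _i =>
        if st.2 > 0 then (st.1 ++ [pvStrMul char (frequency + 1)], st.2 - 1)
        else (st.1 ++ [pvStrMul char frequency], st.2))
      ([], PySem.Int.mod bar_size iterations)
    res.1
  else
    let empty_space := PySem.Int.floordiv iterations bar_size
    let res := (PySem.List.pyRange 0 iterations 1).foldl
      (fun (st : List String × Int) i =>
        if PySem.Int.mod i empty_space = 0 ∧ st.2 > 0 then (st.1 ++ [char], st.2 - 1)
        else (st.1 ++ [empty_char], st.2))
      ([], bar_size)
    (PySem.List.slice? res.1 none none (-1)).getD []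

-- ===== PORT B =====
-- pySetD is Python's bar[i] = char on an in-range index; every assignment B performs is
-- in range (0 ≤ iterations-1-k*step < iterations for 0 ≤ k < bar_size), so it is exact here.
def generate_progress_bar_alt (iterations : Int) (bar_size : Int) (char : String) (empty_char : String) : List String :=
  if iterations = 0 then []
  else if iterations ≤ bar_size then
    let q := PySem.Int.floordiv bar_size iterations
    let r := PySem.Int.mod bar_size iterations
    PySem.List.pyRepeat [pvStrMul char (q + 1)] r ++ PySem.List.pyRepeat [pvStrMul char q] (iterations - r)
  else
    let step := PySem.Int.floordiv iterations bar_size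
    let bar := PySem.List.pyRepeat [empty_char] iterations
    (PySem.List.pyRange 0 bar_size 1).foldl
      (fun b k => PySem.List.pySetD b (iterations - 1 - k * step) char) bar

-- ===== PRECONDITION & SPEC =====
-- Pre_ excludes exactly the inputs where A raises ZeroDivisionError (bar_size = 0 with
-- iterations > 0 reaches 'iterations // bar_size'); B raises there too.
def Pre_generate_progress_bar (iterations : Int) (bar_size : Int) (char : String) (empty_char : String) : Prop :=
  ¬ (bar_size = 0 ∧ 0 < iterations)
instance (iterations : Int) (bar_size : Int) (char : String) (empty_char : String) : Decidable (Pre_generate_progress_bar iterations bar_size char empty_char) := by unfold Pre_generate_progress_bar; infer_instance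

def pvWitness_generate_progress_bar : Int × Int × String × String := (6, 3, "#", "-")

def Spec_generate_progress_bar (iterations : Int) (bar_size : Int) (char : String) (empty_char : String) (out : List String) : Prop := out = generate_progress_bar_alt iterations bar_size char empty_char
instance (iterations : Int) (bar_size : Int) (char : String) (empty_char : String) (out : List String) : Decidable (Spec_generate_progress_bar iterations bar_size char empty_char out) := by unfold Spec_generate_progress_bar; infer_instance

-- ===== CLAIM (what is proved, stated in full; the proofs are below) =====
def Claim_equal_generate_progress_bar : Prop := ∀ (iterations : Int) (bar_size : Int) (char : String) (empty_char : String), Dom_generate_progress_bar iterations bar_size char empty_char → Pre_generate_progress_bar iterations bar_size char empty_char → Spec_generate_progress_bar iterations bar_size char empty_char (generate_progress_bar iterations bar_size char empty_char)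

-- ===== LEMMAS AND PROOFS =====

theorem pvStrMul_one (s : String) : pvStrMul s 1 = s := by
  simp [pvStrMul, PySem.List.pyRepeat]

theorem pv_floordiv_self (n : Int) (h : n ≠ 0) : PySem.Int.floordiv n n = 1 := by
  have hm : PySem.Int.mod n n = 0 := (PySem.Int.mod_eq_zero_iff_dvd n n).mpr dvd_rfl
  have := PySem.Int.floordiv_mul_add_mod n n
  rw [hm, add_zero] at this
  have h1 : PySem.Int.floordiv n n * n = 1 * n := by rw [this, one_mul]
  exact mul_right_cancel₀ h h1

theorem pv_loopA (x y : String) :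
    ∀ (l : List Int) (acc : List String) (m : Int), 0 ≤ m → m ≤ (l.length : Int) →
    ((l.foldl (fun (st : List String × Int) _i =>
        if st.2 > 0 then (st.1 ++ [x], st.2 - 1)
        else (st.1 ++ [y], st.2)) (acc, m)).1)
      = acc ++ List.replicate m.toNat x ++ List.replicate (l.length - m.toNat) y := by
  intro l
  induction l with
  | nil =>
    intro acc m h0 h1
    simp at h1
    have : m = 0 := le_antisymm h1 h0
    subst this
    simp
  | cons a t ih =>
    intro acc m h0 h1
    by_cases hm : m > 0
    · simp only [List.foldl_cons, if_pos hm]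
      rw [ih (acc ++ [x]) (m - 1) (by omega) (by simp at h1 ⊢; omega)]
      have : m.toNat = (m - 1).toNat + 1 := by omega
      rw [this]
      simp [List.replicate_succ, List.length_cons]
    · simp only [List.foldl_cons, if_neg hm]
      have hm0 : m = 0 := by omega
      subst hm0
      rw [ih (acc ++ [y]) 0 (by omega) (by simp)]
      simp [List.replicate_succ]

theorem pv_loopB (c e : String) (f : Int → Prop) [∀ a, Decidable (f a)] :
    ∀ (l : List Int) (acc : List String) (m : Int), m ≤ 0 →
    ((l.foldl (fun (st : List String × Int) i =>
        if f i ∧ st.2 > 0 then (st.1 ++ [c], st.2 - 1)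
        else (st.1 ++ [e], st.2)) (acc, m)).1)
      = acc ++ List.replicate l.length e := by
  intro l
  induction l with
  | nil => simp
  | cons a t ih =>
    intro acc m hm
    have : ¬ (f a ∧ m > 0) := by rintro ⟨-, h⟩; omega
    simp only [List.foldl_cons, if_neg this]
    rw [ih (acc ++ [e]) m hm]
    simp [List.replicate_succ]

theorem pv_loopC (it bs : Int) (c e : String) (hbs : 0 < bs) (hit : bs < it) :
    ∀ (n : Nat) (a m : Int) (acc : List String), 0 ≤ a → (it - a).toNat = n →
    (bs - m - 1) * (PySem.Int.floordiv it bs) < a →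
    (0 < m → a ≤ (bs - m) * (PySem.Int.floordiv it bs)) →
    0 ≤ m → m ≤ bs →
    ((PySem.List.pyRange a it 1).foldl
      (fun (st : List String × Int) i =>
        if PySem.Int.mod i (PySem.Int.floordiv it bs) = 0 ∧ st.2 > 0 then (st.1 ++ [c], st.2 - 1)
        else (st.1 ++ [e], st.2)) (acc, m)).1
      = acc ++ (PySem.List.pyRange a it 1).map
          (fun i => if i ∈ (PySem.List.pyRange 0 bs 1).map (fun k => k * PySem.Int.floordiv it bs) then c else e) := by
  have hstep : 1 ≤ PySem.Int.floordiv it bs :=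
    (PySem.Int.le_floordiv_iff_mul_le hbs).mpr (by omega)
  set step := PySem.Int.floordiv it bs with hstepdef
  have hmem : ∀ i : Int,
      (i ∈ (PySem.List.pyRange 0 bs 1).map (fun k => k * step))
        ↔ ∃ k, (0 ≤ k ∧ k < bs) ∧ k * step = i := by
    intro i
    rw [List.mem_map]
    constructor
    · rintro ⟨k, hk, hki⟩
      exact ⟨k, PySem.List.mem_pyRange_one.mp hk, hki⟩
    · rintro ⟨k, hk, hki⟩
      exact ⟨k, PySem.List.mem_pyRange_one.mpr hk, hki⟩
  intro n
  induction n with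
  | zero =>
    intro a m acc ha hn h1 h2 h3 h4
    rw [PySem.List.pyRange_one_eq_nil (by omega)]
    simp
  | succ n ih =>
    intro a m acc ha hn h1 h2 h3 h4
    have halt : a < it := by omega
    rw [PySem.List.pyRange_one_cons halt]
    simp only [List.foldl_cons, List.map_cons]
    by_cases hd : PySem.Int.mod a step = 0 ∧ m > 0
    · -- fire: a is the (bs - m)-th marker
      obtain ⟨hdvd, hmpos⟩ := hd
      obtain ⟨q, hq⟩ := (PySem.Int.mod_eq_zero_iff_dvd a step).mp hdvd
      have hspos : (0:Int) < step := by omega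
      have hqeq : q = bs - m := by
        have hub : a ≤ (bs - m) * step := h2 hmpos
        rw [hq] at h1 hub
        have l1 : bs - m - 1 < q := by
          have h1' : step * (bs - m - 1) < step * q := by
            calc step * (bs - m - 1) = (bs - m - 1) * step := by ring
            _ < step * q := h1
          exact lt_of_mul_lt_mul_left h1' (le_of_lt hspos)
        have l2 : q ≤ bs - m := by
          have hub' : q * step ≤ (bs - m) * step := by rw [mul_comm] at hq; omega
          exact le_of_mul_le_mul_right hub' hspos
        omega
      have haval : a = (bs - m) * step := by rw [hq, hqeq]; ring
      have hin : a ∈ (PySem.List.pyRange 0 bs 1).map (fun k => k * step) :=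
        (hmem a).mpr ⟨bs - m, ⟨by omega, by omega⟩, haval.symm⟩
      rw [if_pos ⟨hdvd, hmpos⟩, if_pos hin]
      rw [ih (a + 1) (m - 1) (acc ++ [c]) (by omega) (by omega)
          (by rw [show bs - (m - 1) - 1 = bs - m by ring]; omega)
          (by intro h; rw [show bs - (m - 1) = (bs - m) + 1 by ring, add_mul, one_mul]; omega)
          (by omega) (by omega)]
      simp
    · -- no fire: a is not a marker
      have hnotin : a ∉ (PySem.List.pyRange 0 bs 1).map (fun k => k * step) := by
        intro hcon
        obtain ⟨k, ⟨hk0, hkb⟩, hka⟩ := (hmem a).mp hcon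
        have hdvd : PySem.Int.mod a step = 0 :=
          (PySem.Int.mod_eq_zero_iff_dvd a step).mpr ⟨k, by rw [← hka]; ring⟩
        have hmz : m = 0 := by
          by_contra hmz
          exact hd ⟨hdvd, by omega⟩
        subst hmz
        rw [← hka] at h1
        have : bs - 0 - 1 < k := by
          have hspos : (0:Int) < step := by omega
          have h1' : step * (bs - 0 - 1) < step * k := by
            calc step * (bs - 0 - 1) = (bs - 0 - 1) * step := by ring
            _ < k * step := h1
            _ = step * k := by ring
          exact lt_of_mul_lt_mul_left h1' (le_of_lt hspos)
        omega
      rw [if_neg hd, if_neg hnotin]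
      have hlt : 0 < m → a + 1 ≤ (bs - m) * step := by
        intro hmpos
        have hub := h2 hmpos
        rcases lt_or_eq_of_le hub with h | h
        · omega
        · exfalso
          apply hd
          refine ⟨(PySem.Int.mod_eq_zero_iff_dvd a step).mpr ⟨bs - m, by rw [h]; ring⟩, hmpos⟩
      rw [ih (a + 1) m (acc ++ [e]) (by omega) (by omega) (by omega) hlt h3 h4]
      simp

-- the scatter fold: each element of (foldl pySetD) is c at a written index, untouched elsewhere
theorem pv_scatter_get (c : String) :
    ∀ (l : List Int) (xs : List String) (j : Nat),
    (∀ i ∈ l, 0 ≤ i ∧ i < (xs.length : Int)) →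
    (l.foldl (fun b i => PySem.List.pySetD b i c) xs)[j]? =
      if (j : Int) ∈ l then some c else xs[j]? := by
  intro l
  induction l with
  | nil => intro xs j _; simp
  | cons i t ih =>
    intro xs j hr
    obtain ⟨hi0, hilt⟩ := hr i (by simp)
    simp only [List.foldl_cons]
    rw [PySem.List.pySetD_of_nonneg _ _ hi0]
    rw [ih (xs.set i.toNat c) j (by intro x hx; have := hr x (by simp [hx]); simpa using this)]
    by_cases hjt : (j : Int) ∈ t
    · rw [if_pos hjt, if_pos (by simp [hjt])]
    · by_cases hji : (j : Int) = i
      · have hj : j = i.toNat := by omega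
        rw [if_neg hjt, if_pos (by simp [hji]), hj]
        rw [List.getElem?_set_self' ]
        have : i.toNat < xs.length := by omega
        simp [this]
      · rw [if_neg hjt, if_neg (by simp [hji, hjt])]
        rw [List.getElem?_set_ne (by omega)]

-- B's sparse branch equals the reversed marker map of A's sparse branch
theorem pv_scatter_eq (it bs step : Int) (c e : String)
    (hbs : 0 < bs) (hstep : 1 ≤ step) (hub : bs * step ≤ it) :
    (PySem.List.pyRange 0 bs 1).foldl
        (fun b k => PySem.List.pySetD b (it - 1 - k * step) c)
        (PySem.List.pyRepeat [e] it)
    = ((PySem.List.pyRange 0 it 1).map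
        (fun i => if i ∈ (PySem.List.pyRange 0 bs 1).map (fun k => k * step) then c else e)).reverse := by
  have hit : 0 < it := by nlinarith
  rw [PySem.List.pyRepeat_singleton]
  have hfm := List.foldl_map (f := fun k => it - 1 - k * step)
    (g := fun b i => PySem.List.pySetD b i c) (l := PySem.List.pyRange 0 bs 1)
    (init := List.replicate it.toNat e)
  rw [← hfm]
  have hrange : ∀ i ∈ (PySem.List.pyRange 0 bs 1).map (fun k => it - 1 - k * step),
      0 ≤ i ∧ i < ((List.replicate it.toNat e).length : Int) := by
    intro i hi
    obtain ⟨k, hk, hki⟩ := List.mem_map.mp hi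
    obtain ⟨hk0, hkb⟩ := PySem.List.mem_pyRange_one.mp hk
    have hA : k * step ≤ (bs - 1) * step := by nlinarith
    have hB : 0 ≤ k * step := by positivity
    have hC : (bs - 1) * step = bs * step - step := by ring
    simp only [List.length_replicate]
    omega
  apply List.ext_getElem?
  intro j
  rw [pv_scatter_get c _ _ j hrange]
  by_cases hj : j < it.toNat
  · have hmlen : ((PySem.List.pyRange 0 it 1).map
        (fun i => if i ∈ (PySem.List.pyRange 0 bs 1).map (fun k => k * step) then c else e)).length
        = it.toNat := by
      rw [List.length_map, PySem.List.length_pyRange_one]; omega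
    rw [List.getElem?_reverse (by omega), hmlen]
    have hn : it.toNat - 1 - j < (PySem.List.pyRange 0 it 1).length := by
      rw [PySem.List.length_pyRange_one]; omega
    rw [List.getElem?_map, List.getElem?_eq_getElem hn, PySem.List.getElem_pyRange_one]
    simp only [Option.map_some]
    have hcast : (0 : Int) + (↑(it.toNat - 1 - j) : Int) = it - 1 - j := by omega
    rw [hcast]
    have hiff : ((j : Int) ∈ (PySem.List.pyRange 0 bs 1).map (fun k => it - 1 - k * step))
        ↔ (it - 1 - j ∈ (PySem.List.pyRange 0 bs 1).map (fun k => k * step)) := by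
      simp only [List.mem_map]
      constructor
      · rintro ⟨k, hk, hki⟩; exact ⟨k, hk, by omega⟩
      · rintro ⟨k, hk, hki⟩; exact ⟨k, hk, by omega⟩
    by_cases hin : (it - 1 - (j:Int)) ∈ (PySem.List.pyRange 0 bs 1).map (fun k => k * step)
    · rw [if_pos (hiff.mpr hin), if_pos hin]
    · rw [if_neg (fun h => hin (hiff.mp h)), if_neg hin,
        List.getElem?_eq_getElem (by simp; omega)]
      simp
  · have h1 : ((j : Int)) ∉ (PySem.List.pyRange 0 bs 1).map (fun k => it - 1 - k * step) := by
      intro hcon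
      have := hrange _ hcon
      simp at this
      omega
    rw [if_neg h1, List.getElem?_eq_none (by simp; omega),
      List.getElem?_eq_none (by rw [List.length_reverse, List.length_map, PySem.List.length_pyRange_one]; omega)]

-- ===== VERDICT (by name: the statement is the Claim_ definition above) =====
theorem generate_progress_bar_spec : Claim_equal_generate_progress_bar := by
  unfold Claim_equal_generate_progress_bar
  intro it bs c e _hdom hpre
  unfold Pre_generate_progress_bar at hpre
  unfold Spec_generate_progress_bar
  by_cases h0 : it = 0
  · -- iterations = 0 : both sides are []
    subst h0
    rw [generate_progress_bar_alt, if_pos rfl, generate_progress_bar]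
    by_cases hb : (0 : Int) = bs
    · rw [if_pos hb]
      simp [PySem.List.pyRepeat_singleton]
    · rw [if_neg hb, if_neg (fun h => h.2 rfl)]
      rw [PySem.List.pyRange_one_eq_nil (le_refl (0 : Int))]
      simp [PySem.List.slice?_none_none_neg_one]
  · by_cases heq : it = bs
    · -- iterations = bar_size : q = 1, r = 0 in B
      subst heq
      rw [generate_progress_bar, if_pos rfl, generate_progress_bar_alt, if_neg h0,
        if_pos (le_refl it)]
      dsimp only
      rw [pv_floordiv_self it h0, (PySem.Int.mod_eq_zero_iff_dvd it it).mpr dvd_rfl]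
      simp [PySem.List.pyRepeat_singleton, pvStrMul_one]
    · by_cases hlt : it < bs
      · -- even-distribution branch
        rw [generate_progress_bar, if_neg heq, if_pos ⟨hlt, h0⟩, generate_progress_bar_alt,
          if_neg h0, if_pos (le_of_lt hlt)]
        dsimp only
        by_cases hpos : 0 < it
        · have hr0 : 0 ≤ PySem.Int.mod bs it := PySem.Int.mod_nonneg bs hpos
          have hrlt : PySem.Int.mod bs it < it := PySem.Int.mod_lt bs hpos
          have hlen : ((PySem.List.pyRange 0 it 1).length : Int) = it := by
            rw [PySem.List.length_pyRange_one]; omega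
          rw [pv_loopA (pvStrMul c (PySem.Int.floordiv bs it + 1))
            (pvStrMul c (PySem.Int.floordiv bs it)) (PySem.List.pyRange 0 it 1) []
            (PySem.Int.mod bs it) hr0 (by omega)]
          rw [PySem.List.pyRepeat_singleton, PySem.List.pyRepeat_singleton]
          have hln : (PySem.List.pyRange 0 it 1).length - (PySem.Int.mod bs it).toNat
              = (it - PySem.Int.mod bs it).toNat := by
            rw [PySem.List.length_pyRange_one]; omega
          rw [hln]
          simp
        · -- iterations < 0 : both sides empty
          have hneg : it < 0 := by omega
          rw [PySem.List.pyRange_one_eq_nil (by omega), List.foldl_nil]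
          have hmb := PySem.Int.mod_neg_bounds bs hneg
          rw [PySem.List.pyRepeat_singleton, PySem.List.pyRepeat_singleton]
          have e1 : (PySem.Int.mod bs it).toNat = 0 := by omega
          have e2 : (it - PySem.Int.mod bs it).toNat = 0 := by omega
          rw [e1, e2]
          simp
      · -- sparse branch : bar_size < iterations
        have hgt : bs < it := by omega
        rw [generate_progress_bar, if_neg heq, if_neg (fun h => hlt h.1),
          generate_progress_bar_alt, if_neg h0, if_neg (by omega)]
        dsimp only
        by_cases hpos : 0 < it
        · have hbs0 : bs ≠ 0 := fun h => hpre ⟨h, hpos⟩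
          by_cases hbspos : 0 < bs
          · -- the marked positions are exactly k * step, k < bs
            have hstep : 1 ≤ PySem.Int.floordiv it bs :=
              (PySem.Int.le_floordiv_iff_mul_le hbspos).mpr (by omega)
            have hub : bs * PySem.Int.floordiv it bs ≤ it := by
              have hmod := PySem.Int.mod_nonneg it hbspos
              have := PySem.Int.floordiv_mul_add_mod it bs
              nlinarith
            rw [pv_loopC it bs c e hbspos hgt (it - 0).toNat 0 bs [] (le_refl 0) rfl
              (by have h : (bs - bs - 1) * PySem.Int.floordiv it bs
                    = -(PySem.Int.floordiv it bs) := by ring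
                  rw [h]; omega)
              (by intro _
                  have h : (bs - bs) * PySem.Int.floordiv it bs = 0 := by ring
                  rw [h])
              (by omega) (le_refl bs)]
            rw [PySem.List.slice?_none_none_neg_one, Option.getD_some]
            rw [pv_scatter_eq it bs (PySem.Int.floordiv it bs) c e hbspos hstep hub]
            simp
          · -- bar_size < 0 : counter never positive, no position marked; B writes nothing
            have hbneg : bs < 0 := by omega
            rw [pv_loopB c e (fun i => PySem.Int.mod i (PySem.Int.floordiv it bs) = 0)
              (PySem.List.pyRange 0 it 1) [] bs (by omega)]
            rw [PySem.List.slice?_none_none_neg_one, Option.getD_some]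
            rw [PySem.List.pyRange_one_eq_nil (by omega : bs ≤ 0), List.foldl_nil,
              PySem.List.pyRepeat_singleton]
            rw [List.nil_append, List.reverse_replicate]
            have : (PySem.List.pyRange 0 it 1).length = it.toNat := by
              rw [PySem.List.length_pyRange_one]; omega
            rw [this]
        · -- iterations < 0 : both sides empty
          rw [PySem.List.pyRange_one_eq_nil (by omega), List.foldl_nil,
            PySem.List.pyRange_one_eq_nil (by omega : bs ≤ 0), List.foldl_nil,
            PySem.List.pyRepeat_singleton]
          have : it.toNat = 0 := by omega
          rw [this]
          simp [PySem.List.slice?_none_none_neg_one]
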